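-- pv_equiv track=rewrite | github.com/yooncoderhere/2025_yooncoder | 백준/Platinum/3015. 오아시스 재결합/오아시스 재결합.py | count_visible_pairs
-- ===== SOURCE A (Python) =====
-- def count_visible_pairs(n, heights):
--     stack = []
--     result = 0
--
--     for h in heights:
--         count = 1  # 현재 사람의 개수 (동일한 키가 연속으로 있는 경우)
--
--         # 스택의 top보다 키가 크면 pop하면서 카운트 증가
--         while stack and stack[-1][0] <= h:
--             height, cnt = stack.pop()
--             result += cnt  # pop된 사람들은 현재 사람과 볼 수 있음
--
--             if height == h:  # 같은 키면 개수 누적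
--                 count += cnt
--
--         # 스택에 현재 사람 추가
--         if stack:
--             result += 1  # 현재 사람은 스택의 top과도 볼 수 있음
--
--         stack.append((h, count))
--
--     return result
-- ===== SOURCE B (Python) =====
-- def count_visible_pairs(n, heights):
--     total = 0
--     seen = []                      # already-processed people, most recent first
--     for h in heights:
--         m = None                   # max height strictly between the candidate pair
--         for x in seen:
--             if m is None or m <= min(x, h):
--                 total += 1
--             m = x if m is None else max(m, x)
--         seen = [h] + seen
--     return total
-- ===== Notes on version B (the rewrite author's own statement) =====
-- stated objective: simpler
-- what changed: Replaced the monotonic stack of (height, run-count) pairs by a direct O(n^2) brute force that, for each person, scans the already-seen people nearest-first while maintaining the maximum height strictly between, counting a pair whenever that maximum is at most the smaller of the two heights.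
import Mathlib
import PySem

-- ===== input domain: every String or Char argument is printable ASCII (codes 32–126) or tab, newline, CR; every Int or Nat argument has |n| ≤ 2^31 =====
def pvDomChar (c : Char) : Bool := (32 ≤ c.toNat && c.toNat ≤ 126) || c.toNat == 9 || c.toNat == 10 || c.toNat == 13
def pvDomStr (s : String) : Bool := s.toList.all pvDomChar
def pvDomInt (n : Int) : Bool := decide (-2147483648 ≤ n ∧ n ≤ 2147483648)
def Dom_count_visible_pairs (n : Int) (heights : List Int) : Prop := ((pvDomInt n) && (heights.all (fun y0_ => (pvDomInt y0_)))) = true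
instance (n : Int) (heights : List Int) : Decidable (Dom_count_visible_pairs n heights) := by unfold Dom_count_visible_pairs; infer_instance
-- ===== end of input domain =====

-- B replaces A's monotonic stack by the plain O(n^2) backward scan that counts pairs
-- straight from the visibility definition (objective: simpler; B is not faster).

-- ===== PORT A =====
-- A's Python list used as a stack (append / pop / stack[-1] at the end) is ported
-- head-first: head of the Lean list = top of the stack.
-- the while loop: pops while top height ≤ h, accumulating result and count
def pvPopLoop (h : Int) : List (Int × Int) → Int → Int → List (Int × Int) × Int × Int
  | [], res, cnt => ([], res, cnt)
  | (g, c) :: rest, res, cnt =>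
      if g ≤ h then pvPopLoop h rest (res + c) (if g = h then cnt + c else cnt)
      else ((g, c) :: rest, res, cnt)

-- one iteration of A's for loop: count = 1, the while loop, 'if stack: result += 1', push
def pvAStep (h : Int) (st : List (Int × Int)) (res : Int) : List (Int × Int) × Int :=
  let t := pvPopLoop h st res 1
  let res' := if t.1 = [] then t.2.1 else t.2.1 + 1
  ((h, t.2.2) :: t.1, res')

def count_visible_pairs (n : Int) (heights : List Int) : Int :=
  (heights.foldl (fun s h => pvAStep h s.1 s.2) (([] : List (Int × Int)), (0 : Int))).2

-- ===== PORT B =====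
-- mirrors Python's 'm is None or m <= x'
def pvLeOpt : Option Int → Int → Bool
  | none, _ => true
  | some m, x => decide (m ≤ x)

-- mirrors Python's 'm = x if m is None else max(m, x)'
def pvMaxOpt : Option Int → Int → Int
  | none, x => x
  | some m, x => max m x

-- B's inner loop: scan the already-seen people (most recent first) keeping m,
-- the max height strictly between; count a pair when m ≤ min(x, h)
def pvVt (h : Int) : Option Int → List Int → Int
  | _, [] => 0
  | m, x :: rest =>
      (if pvLeOpt m (min x h) then 1 else 0) + pvVt h (some (pvMaxOpt m x)) rest

def count_visible_pairs_alt (n : Int) (heights : List Int) : Int :=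
  (heights.foldl (fun (s : List Int × Int) h => (h :: s.1, s.2 + pvVt h none s.1))
    (([] : List Int), (0 : Int))).2

-- ===== PRECONDITION & SPEC =====
def Spec_count_visible_pairs (n : Int) (heights : List Int) (out : Int) : Prop := out = count_visible_pairs_alt n heights
instance (n : Int) (heights : List Int) (out : Int) : Decidable (Spec_count_visible_pairs n heights out) := by unfold Spec_count_visible_pairs; infer_instance

-- ===== CLAIM (what is proved, stated in full; the proofs are below) =====
def Claim_equal_count_visible_pairs : Prop := ∀ (n : Int) (heights : List Int), Dom_count_visible_pairs n heights → Spec_count_visible_pairs n heights (count_visible_pairs n heights)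

-- ===== LEMMAS AND PROOFS =====

-- 'g < m0' for optional lower bound (none = -infinity)
def pvLtOpt : Int → Option Int → Bool
  | _, none => false
  | g, some m => decide (g < m)

-- denotation of a stack: how many pairs a newcomer of height h forms with the
-- people a stack summarizes, when the scan starts with between-max m0
def pvLD (m0 : Option Int) (h : Int) : List (Int × Int) → Int
  | [] => 0
  | (g, c) :: rest =>
      if pvLtOpt g m0 then pvLD m0 h rest
      else if g ≤ h then c + pvLD m0 h rest
      else if pvLeOpt m0 h then 1 else 0

def pvSorted (st : List (Int × Int)) : Prop := List.Pairwise (fun e f => e.1 < f.1) st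

def pvInv (rp : List Int) (st : List (Int × Int)) : Prop :=
  ∀ m0 h, pvVt h m0 rp = pvLD m0 h st

theorem pvLD_blocked (h m : Int) (st : List (Int × Int)) (hm : h < m) :
    pvLD (some m) h st = 0 := by
  induction st with
  | nil => rfl
  | cons e rest ih =>
    obtain ⟨g, c⟩ := e
    simp only [pvLD, pvLtOpt, pvLeOpt]
    split_ifs with h1 h2 h3 <;> simp_all <;> omega

theorem pvLD_congr (h : Int) (m1 m2 : Option Int) (st : List (Int × Int))
    (hlt : ∀ p ∈ st, pvLtOpt p.1 m1 = pvLtOpt p.1 m2)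
    (hle : pvLeOpt m1 h = pvLeOpt m2 h) :
    pvLD m1 h st = pvLD m2 h st := by
  induction st with
  | nil => rfl
  | cons e rest ih =>
    obtain ⟨g, c⟩ := e
    have hg := hlt (g, c) (by simp)
    simp only [pvLD, hg, hle]
    split_ifs with h1 h2
    · exact ih (fun p hp => hlt p (by simp [hp]))
    · rw [ih (fun p hp => hlt p (by simp [hp]))]
    · rfl
    · rfl

-- A's per-element result increment equals pvLD none h st
theorem pvPop_res (h : Int) (st : List (Int × Int)) :
    ∀ res cnt, (if (pvPopLoop h st res cnt).1 = [] then (pvPopLoop h st res cnt).2.1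
                else (pvPopLoop h st res cnt).2.1 + 1) = res + pvLD none h st := by
  induction st with
  | nil => intro res cnt; simp [pvPopLoop, pvLD]
  | cons e rest ih =>
    intro res cnt
    obtain ⟨g, c⟩ := e
    by_cases h1 : g ≤ h
    · have : pvLD none h ((g, c) :: rest) = c + pvLD none h rest := by
        simp [pvLD, pvLtOpt, h1]
      rw [this]
      have h2 : pvPopLoop h ((g, c) :: rest) res cnt
          = pvPopLoop h rest (res + c) (if g = h then cnt + c else cnt) := by
        simp [pvPopLoop, h1]
      rw [h2, ih]
      omega
    · have h2 : pvPopLoop h ((g, c) :: rest) res cnt = ((g, c) :: rest, res, cnt) := by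
        simp [pvPopLoop, h1]
      rw [h2]
      simp [pvLD, pvLtOpt, pvLeOpt, h1]

theorem pvAStep_res (h : Int) (st : List (Int × Int)) (res : Int) :
    (pvAStep h st res).2 = res + pvLD none h st := by
  simpa [pvAStep] using pvPop_res h st res 1

-- the popped stack is a tail-filtered stack: sortedness and the lower bound survive
theorem pvPop_sorted (h : Int) (st : List (Int × Int)) (hs : pvSorted st) :
    ∀ res cnt, pvSorted ((pvPopLoop h st res cnt).1) ∧
      (∀ p ∈ (pvPopLoop h st res cnt).1, h < p.1) := by
  induction st with
  | nil => intro res cnt; simp [pvPopLoop, pvSorted]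
  | cons e rest ih =>
    intro res cnt
    obtain ⟨g, c⟩ := e
    rw [pvSorted, List.pairwise_cons] at hs
    by_cases h1 : g ≤ h
    · have h2 : pvPopLoop h ((g, c) :: rest) res cnt
          = pvPopLoop h rest (res + c) (if g = h then cnt + c else cnt) := by
        simp [pvPopLoop, h1]
      rw [h2]
      exact ih hs.2 _ _
    · have h2 : pvPopLoop h ((g, c) :: rest) res cnt = ((g, c) :: rest, res, cnt) := by
        simp [pvPopLoop, h1]
      rw [h2]
      refine ⟨List.pairwise_cons.mpr ⟨hs.1, hs.2⟩, ?_⟩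
      intro p hp
      rcases List.mem_cons.mp hp with h2 | h2
      · subst h2; omega
      · have := hs.1 p h2; omega

-- the crux: popping with a then pushing (a, cnt) rewrites the stack denotation
-- exactly the way prepending a person of height a rewrites the backward scan
theorem pvCrux (a h : Int) (st : List (Int × Int)) (hs : pvSorted st) :
    ∀ m0 res cnt,
      pvLD m0 h ((a, (pvPopLoop a st res cnt).2.2) :: (pvPopLoop a st res cnt).1)
      = (if pvLtOpt a m0 then 0 else if a ≤ h then cnt else if pvLeOpt m0 h then 1 else 0)
        + pvLD (some (pvMaxOpt m0 a)) h st := by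
  induction st with
  | nil =>
    intro m0 res cnt
    simp only [pvPopLoop, pvLD]
    split_ifs <;> omega
  | cons e rest ih =>
    intro m0 res cnt
    obtain ⟨g, c⟩ := e
    rw [pvSorted, List.pairwise_cons] at hs
    have hrest : ∀ p ∈ rest, g < p.1 := hs.1
    by_cases h1 : g ≤ a
    · -- the entry (g, c) is popped
      have hpop : pvPopLoop a ((g, c) :: rest) res cnt
          = pvPopLoop a rest (res + c) (if g = a then cnt + c else cnt) := by
        simp [pvPopLoop, h1]
      rw [hpop, ih hs.2]
      by_cases hga : g = a
      · -- equal height: merged into the new entry's count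
        subst hga
        rw [if_pos rfl]
        by_cases hlt : pvLtOpt g m0 = true
        · -- g itself hidden below m0; the entry is skipped on both sides
          rcases m0 with _ | m
          · simp [pvLtOpt] at hlt
          · have hm : g < m := by simpa [pvLtOpt] using hlt
            have h3 : pvMaxOpt (some m) g = m := by simp [pvMaxOpt]; omega
            simp [pvLD, pvLtOpt, hlt, h3, hm]
        · have hM : pvMaxOpt m0 g = g := by
            rcases m0 with _ | m <;> simp [pvMaxOpt, pvLtOpt] at hlt ⊢ <;> omega
          rw [hM]
          by_cases hgh : g ≤ h
          · have hx : pvLD (some g) h ((g, c) :: rest) = c + pvLD (some g) h rest := by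
              simp [pvLD, pvLtOpt, hgh]
            rw [hx]
            simp only [hlt, Bool.false_eq_true, if_false, if_pos hgh]
            omega
          · have hz : pvLD (some g) h rest = 0 := pvLD_blocked h g rest (by omega)
            have hx : pvLD (some g) h ((g, c) :: rest) = 0 := by
              simp [pvLD, pvLtOpt, pvLeOpt, hgh]
            rw [hx, hz]
            simp only [hlt, Bool.false_eq_true, if_false, if_neg hgh]
      · -- g < a : the entry disappears from both sides
        have hga' : g < a := lt_of_le_of_ne h1 hga
        rw [if_neg hga]
        have hlt : pvLtOpt g (some (pvMaxOpt m0 a)) = true := by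
          rcases m0 with _ | m <;> simp [pvMaxOpt, pvLtOpt] <;> omega
        have hx : pvLD (some (pvMaxOpt m0 a)) h ((g, c) :: rest)
            = pvLD (some (pvMaxOpt m0 a)) h rest := by
          simp [pvLD, hlt]
        rw [hx]
    · -- a < g : nothing is popped, (a, cnt) sits on top
      have hag : a < g := by omega
      have hpop : pvPopLoop a ((g, c) :: rest) res cnt = ((g, c) :: rest, res, cnt) := by
        simp [pvPopLoop, h1]
      rw [hpop]
      by_cases hlt : pvLtOpt a m0 = true
      · -- a hidden below m0 = some m; maxOpt m0 a = m
        rcases m0 with _ | m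
        · simp [pvLtOpt] at hlt
        · have ham : a < m := by simpa [pvLtOpt] using hlt
          have h3 : pvMaxOpt (some m) a = m := by simp [pvMaxOpt]; omega
          simp [pvLD, hlt, h3]
      · have hM : pvMaxOpt m0 a = a := by
          rcases m0 with _ | m <;> simp [pvMaxOpt, pvLtOpt] at hlt ⊢ <;> omega
        rw [hM]
        by_cases hah : a ≤ h
        · -- the newcomer group is visible
          have hx : pvLD m0 h ((a, cnt) :: (g, c) :: rest)
              = cnt + pvLD m0 h ((g, c) :: rest) := by
            simp [pvLD, hlt, hah]
          rw [hx]
          have hy : pvLD (some a) h ((g, c) :: rest) = pvLD m0 h ((g, c) :: rest) := by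
            have hbnd : ∀ p ∈ (g, c) :: rest, a < p.1 := by
              intro p hp
              rcases List.mem_cons.mp hp with h2 | h2
              · subst h2; exact hag
              · have := hrest p h2; omega
            refine pvLD_congr h _ _ _ ?_ ?_
            · intro p hp
              have := hbnd p hp
              rcases m0 with _ | m
              · simp [pvLtOpt]; omega
              · have hma : m ≤ a := by simp [pvLtOpt] at hlt; omega
                simp only [pvLtOpt, decide_eq_decide]
                omega
            · rcases m0 with _ | m
              · simp [pvLeOpt, hah]
              · have hma : m ≤ a := by simp [pvLtOpt] at hlt; omega
                simp only [pvLeOpt, decide_eq_decide]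
                omega
          rw [hy]
          simp [hlt, hah]
        · -- a > h : pvLD stops at the new entry with the old visibility bit
          have hx : pvLD m0 h ((a, cnt) :: (g, c) :: rest)
              = if pvLeOpt m0 h then 1 else 0 := by
            simp [pvLD, hlt, hah]
          have hz : pvLD (some a) h ((g, c) :: rest) = 0 :=
            pvLD_blocked h a _ (by omega)
          rw [hx, hz]
          simp [hlt, hah]

-- the invariant is preserved by one step of each loop
theorem pvInv_step (a : Int) (rp : List Int) (st : List (Int × Int)) (res : Int)
    (hs : pvSorted st) (hinv : pvInv rp st) :
    pvInv (a :: rp) ((pvAStep a st res).1) := by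
  intro m0 h
  have hstep : (pvAStep a st res).1
      = (a, (pvPopLoop a st res 1).2.2) :: (pvPopLoop a st res 1).1 := rfl
  have hvt : pvVt h m0 (a :: rp)
      = (if pvLeOpt m0 (min a h) then 1 else 0) + pvVt h (some (pvMaxOpt m0 a)) rp := rfl
  rw [hstep, pvCrux a h st hs m0 res 1, hvt, hinv]
  have hbit : (if pvLeOpt m0 (min a h) then (1 : Int) else 0)
      = (if pvLtOpt a m0 then 0 else if a ≤ h then 1 else if pvLeOpt m0 h then 1 else 0) := by
    rcases m0 with _ | m
    · simp only [pvLeOpt, pvLtOpt]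
      split_ifs <;> simp_all
    · simp only [pvLeOpt, pvLtOpt, min_def, decide_eq_true_eq]
      split_ifs <;> omega
  omega

theorem pvAStep_sorted (a : Int) (st : List (Int × Int)) (res : Int) (hs : pvSorted st) :
    pvSorted ((pvAStep a st res).1) := by
  have hstep : (pvAStep a st res).1
      = (a, (pvPopLoop a st res 1).2.2) :: (pvPopLoop a st res 1).1 := rfl
  rw [hstep, pvSorted, List.pairwise_cons]
  obtain ⟨h1, h2⟩ := pvPop_sorted a st hs res 1
  exact ⟨fun p hp => h2 p hp, h1⟩

-- the generalized equivalence of the two folds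
theorem pvMain (hs : List Int) :
    ∀ (st : List (Int × Int)) (rp : List Int) (res : Int),
      pvSorted st → pvInv rp st →
      (hs.foldl (fun s h => pvAStep h s.1 s.2) (st, res)).2
      = (hs.foldl (fun (s : List Int × Int) h => (h :: s.1, s.2 + pvVt h none s.1)) (rp, res)).2 := by
  induction hs with
  | nil => intro st rp res _ _; rfl
  | cons a rest ih =>
    intro st rp res hsort hinv
    simp only [List.foldl_cons]
    have hres : (pvAStep a st res).2 = res + pvVt a none rp := by
      rw [pvAStep_res, hinv none a]
    have : (pvAStep a st res) = ((pvAStep a st res).1, res + pvVt a none rp) := by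
      rw [← hres]
    rw [this]
    exact ih _ _ _ (pvAStep_sorted a st res hsort) (pvInv_step a rp st res hsort hinv)

-- ===== VERDICT (by name: the statement is the Claim_ definition above) =====
theorem count_visible_pairs_spec : Claim_equal_count_visible_pairs := by
  intro n heights _
  unfold Spec_count_visible_pairs count_visible_pairs count_visible_pairs_alt
  exact pvMain heights [] [] 0 (by simp [pvSorted]) (fun m0 h => rfl)
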